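-- pv_equiv track=rewrite | github.com/YeonHL/Coding_Problem | BAEKJOON/[2596] 비밀편지.py | check
-- ===== SOURCE A (Python) =====
-- def check(word):
--     crypto = {'000000': 'A', '001111': 'B', '010011': 'C', '011100': 'D',
--               '100110': 'E', '101001': 'F', '110101': 'G', '111010': 'H'}
--
--     for x in crypto:
--         if word == x:
--             return crypto[x]
--
--     for alpha in crypto:
--         cnt = 0
--         j = 0
--
--         for x in alpha:
--             if x != word[j]:
--                 cnt += 1
--             j += 1
--
--         if cnt == 1:
--             return crypto[alpha]
--
--     return ''
-- ===== SOURCE B (Python) =====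
-- def check(word):
--     table = [('000000', 'A'), ('001111', 'B'), ('010011', 'C'), ('011100', 'D'),
--              ('100110', 'E'), ('101001', 'F'), ('110101', 'G'), ('111010', 'H')]
--     for code, letter in table:
--         if word == code or sum(word[j] != code[j] for j in range(6)) == 1:
--             return letter
--     return ''
-- ===== Notes on version B (the rewrite author's own statement) =====
-- stated objective: simpler
-- what changed: B replaces A's two separate passes (exact-match scan, then per-codeword mismatch-count scan) by a single scan over the 8 codewords that returns the letter as soon as the word equals the codeword or differs from it in exactly one of the first six positions; correct because the code has minimum distance 3.
import Mathlib
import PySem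

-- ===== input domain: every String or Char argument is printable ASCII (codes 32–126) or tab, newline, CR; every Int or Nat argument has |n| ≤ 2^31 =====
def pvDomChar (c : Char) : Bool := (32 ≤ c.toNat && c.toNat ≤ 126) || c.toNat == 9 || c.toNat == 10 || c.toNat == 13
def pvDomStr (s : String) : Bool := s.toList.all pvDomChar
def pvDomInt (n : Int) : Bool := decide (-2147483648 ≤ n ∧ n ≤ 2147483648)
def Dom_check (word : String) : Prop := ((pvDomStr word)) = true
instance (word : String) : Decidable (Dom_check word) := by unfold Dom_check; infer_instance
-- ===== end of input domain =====

-- B merges A's two passes (exact match, then single-mismatch count) into one scan of the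
-- 8 codewords (valid because the code has minimum distance 3): objective 'simpler'.

-- ===== PORT A =====
-- the dict 'crypto' in insertion order (both of A's loops iterate its keys in this order)
def cryptoA : List (String × String) :=
  [("000000", "A"), ("001111", "B"), ("010011", "C"), ("011100", "D"),
   ("100110", "E"), ("101001", "F"), ("110101", "G"), ("111010", "H")]

-- first loop of A: return crypto[x] on exact match
def checkPass1 (word : String) : List (String × String) → Option String
  | [] => none
  | (k, v) :: rest => if word = k then some v else checkPass1 word rest

-- inner loop of A: 'for x in alpha: if x != word[j]: cnt += 1; j += 1'
-- none = IndexError from word[j] (only reachable when len(word) < 6, outside Pre_)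
def innerCnt (word : String) : List Char → Int → Int → Option Int
  | [], cnt, _ => some cnt
  | x :: rest, cnt, j =>
    match PySem.Str.pyGet? word j with
    | none => none
    | some c => innerCnt word rest (if x ≠ c then cnt + 1 else cnt) (j + 1)

-- second loop of A; none = IndexError propagated
def checkPass2 (word : String) : List (String × String) → Option String
  | [] => some ""
  | (alpha, v) :: rest =>
    match innerCnt word alpha.toList 0 0 with
    | none => none
    | some cnt => if cnt = 1 then some v else checkPass2 word rest

-- the '.getD ""' only fires where the Python raises IndexError (excluded by Pre_check)
def check (word : String) : String :=
  match checkPass1 word cryptoA with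
  | some v => v
  | none => (checkPass2 word cryptoA).getD ""

-- ===== PORT B =====
-- sum(word[j] != code[j] for j in range(6)); none = IndexError (len(word) < 6, outside Pre_)
def mismatchSum (word code : String) : List Int → Int → Option Int
  | [], acc => some acc
  | j :: rest, acc =>
    match PySem.Str.pyGet? word j with
    | none => none
    | some a =>
      match PySem.Str.pyGet? code j with
      | none => none
      | some b => mismatchSum word code rest (acc + (if a ≠ b then 1 else 0))

-- single scan: 'if word == code or sum(...) == 1: return letter' (short-circuit 'or')
def checkAltLoop (word : String) : List (String × String) → Option String
  | [] => some ""
  | (code, letter) :: rest =>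
    if word = code then some letter
    else
      match mismatchSum word code (PySem.List.pyRange 0 6 1) 0 with
      | none => none
      | some d => if d = 1 then some letter else checkAltLoop word rest

-- the '.getD ""' only fires where the Python raises IndexError (excluded by Pre_check)
def check_alt (word : String) : String :=
  (checkAltLoop word cryptoA).getD ""

-- ===== PRECONDITION & SPEC =====
-- A raises IndexError (word[j] in its second loop) exactly when len(word) < 6; B raises there too.
def Pre_check (word : String) : Prop := 6 ≤ word.toList.length
instance (word : String) : Decidable (Pre_check word) := by unfold Pre_check; infer_instance
def pvWitness_check : String := "010010"

def Spec_check (word : String) (out : String) : Prop := out = check_alt word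
instance (word : String) (out : String) : Decidable (Spec_check word out) := by unfold Spec_check; infer_instance

-- ===== CLAIM (what is proved, stated in full; the proofs are below) =====
def Claim_equal_check : Prop := ∀ (word : String), Dom_check word → Pre_check word → Spec_check word (check word)

-- ===== LEMMAS AND PROOFS =====

-- 0/1 mismatch indicator shared by the two evaluation lemmas
def M (c x : Char) : Int := if x = c then 0 else 1

theorem pg (c0 c1 c2 c3 c4 c5 : Char) (t : List Char) (n : Nat) (hn : n < 6) :
    PySem.List.pyGet? (c0 :: c1 :: c2 :: c3 :: c4 :: c5 :: t) (n : Int) =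
      some ((c0 :: c1 :: c2 :: c3 :: c4 :: c5 :: t)[n]'(by simp; omega)) := by
  rw [PySem.List.pyGet?_natCast, List.getElem?_eq_getElem (by simp; omega)]

theorem take6 (l : List Char) (hl : 6 ≤ l.length) :
    ∃ c0 c1 c2 c3 c4 c5 t, l = c0 :: c1 :: c2 :: c3 :: c4 :: c5 :: t := by
  obtain _ | ⟨c0, _ | ⟨c1, _ | ⟨c2, _ | ⟨c3, _ | ⟨c4, _ | ⟨c5, t⟩⟩⟩⟩⟩⟩ := l <;>
    first
      | exact ⟨_, _, _, _, _, _, _, rfl⟩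
      | simp at hl

set_option maxHeartbeats 1000000 in
theorem innerCnt6 (w : String) (c0 c1 c2 c3 c4 c5 : Char) (t : List Char)
    (h : w.toList = c0 :: c1 :: c2 :: c3 :: c4 :: c5 :: t)
    (x0 x1 x2 x3 x4 x5 : Char) (k : String)
    (hk : k.toList = [x0, x1, x2, x3, x4, x5]) :
    innerCnt w k.toList 0 0 =
      some (0 + M c0 x0 + M c1 x1 + M c2 x2 + M c3 x3 + M c4 x4 + M c5 x5) := by
  have g1 := pg c0 c1 c2 c3 c4 c5 t 1 (by omega)
  have g2 := pg c0 c1 c2 c3 c4 c5 t 2 (by omega)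
  have g3 := pg c0 c1 c2 c3 c4 c5 t 3 (by omega)
  have g4 := pg c0 c1 c2 c3 c4 c5 t 4 (by omega)
  have g5 := pg c0 c1 c2 c3 c4 c5 t 5 (by omega)
  norm_num at g1 g2 g3 g4 g5
  simp only [hk, innerCnt, PySem.Str.pyGet?, h]
  norm_num
  by_cases h0 : x0 = c0 <;> by_cases h1 : x1 = c1 <;> by_cases h2 : x2 = c2 <;>
    by_cases h3 : x3 = c3 <;> by_cases h4 : x4 = c4 <;> by_cases h5 : x5 = c5 <;>
    simp [M, h0, h1, h2, h3, h4, h5, g1, g2, g3, g4, g5]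

set_option maxHeartbeats 1000000 in
theorem mismatchSum6 (w : String) (c0 c1 c2 c3 c4 c5 : Char) (t : List Char)
    (h : w.toList = c0 :: c1 :: c2 :: c3 :: c4 :: c5 :: t)
    (x0 x1 x2 x3 x4 x5 : Char) (k : String)
    (hk : k.toList = [x0, x1, x2, x3, x4, x5]) :
    mismatchSum w k (PySem.List.pyRange 0 6 1) 0 =
      some (0 + M c0 x0 + M c1 x1 + M c2 x2 + M c3 x3 + M c4 x4 + M c5 x5) := by
  have g1 := pg c0 c1 c2 c3 c4 c5 t 1 (by omega)
  have g2 := pg c0 c1 c2 c3 c4 c5 t 2 (by omega)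
  have g3 := pg c0 c1 c2 c3 c4 c5 t 3 (by omega)
  have g4 := pg c0 c1 c2 c3 c4 c5 t 4 (by omega)
  have g5 := pg c0 c1 c2 c3 c4 c5 t 5 (by omega)
  norm_num at g1 g2 g3 g4 g5
  have hr : PySem.List.pyRange 0 6 1 = [0, 1, 2, 3, 4, 5] := by decide
  simp only [hr, mismatchSum, PySem.Str.pyGet?, h, hk]
  norm_num
  simp only [g1, g2, g3, g4, g5]
  norm_num
  by_cases h0 : c0 = x0 <;> by_cases h1 : c1 = x1 <;> by_cases h2 : c2 = x2 <;>
    by_cases h3 : c3 = x3 <;> by_cases h4 : c4 = x4 <;> by_cases h5 : c5 = x5 <;>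
    simp [M, h0, h1, h2, h3, h4, h5, eq_comm]

-- ===== VERDICT (by name: the statement is the Claim_ definition above) =====
set_option maxHeartbeats 2000000 in
theorem check_spec : Claim_equal_check := by
  intro word _ hpre
  show check word = check_alt word
  by_cases e0 : word = "000000"; · subst e0; decide
  by_cases e1 : word = "001111"; · subst e1; decide
  by_cases e2 : word = "010011"; · subst e2; decide
  by_cases e3 : word = "011100"; · subst e3; decide
  by_cases e4 : word = "100110"; · subst e4; decide
  by_cases e5 : word = "101001"; · subst e5; decide
  by_cases e6 : word = "110101"; · subst e6; decide
  by_cases e7 : word = "111010"; · subst e7; decide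
  obtain ⟨c0, c1, c2, c3, c4, c5, t, h⟩ := take6 word.toList hpre
  simp only [check, check_alt, checkPass1, checkPass2, checkAltLoop, cryptoA,
    if_neg e0, if_neg e1, if_neg e2, if_neg e3, if_neg e4, if_neg e5, if_neg e6, if_neg e7]
  rw [innerCnt6 word c0 c1 c2 c3 c4 c5 t h '0' '0' '0' '0' '0' '0' "000000" rfl,
      innerCnt6 word c0 c1 c2 c3 c4 c5 t h '0' '0' '1' '1' '1' '1' "001111" rfl,
      innerCnt6 word c0 c1 c2 c3 c4 c5 t h '0' '1' '0' '0' '1' '1' "010011" rfl,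
      innerCnt6 word c0 c1 c2 c3 c4 c5 t h '0' '1' '1' '1' '0' '0' "011100" rfl,
      innerCnt6 word c0 c1 c2 c3 c4 c5 t h '1' '0' '0' '1' '1' '0' "100110" rfl,
      innerCnt6 word c0 c1 c2 c3 c4 c5 t h '1' '0' '1' '0' '0' '1' "101001" rfl,
      innerCnt6 word c0 c1 c2 c3 c4 c5 t h '1' '1' '0' '1' '0' '1' "110101" rfl,
      innerCnt6 word c0 c1 c2 c3 c4 c5 t h '1' '1' '1' '0' '1' '0' "111010" rfl,
      mismatchSum6 word c0 c1 c2 c3 c4 c5 t h '0' '0' '0' '0' '0' '0' "000000" rfl,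
      mismatchSum6 word c0 c1 c2 c3 c4 c5 t h '0' '0' '1' '1' '1' '1' "001111" rfl,
      mismatchSum6 word c0 c1 c2 c3 c4 c5 t h '0' '1' '0' '0' '1' '1' "010011" rfl,
      mismatchSum6 word c0 c1 c2 c3 c4 c5 t h '0' '1' '1' '1' '0' '0' "011100" rfl,
      mismatchSum6 word c0 c1 c2 c3 c4 c5 t h '1' '0' '0' '1' '1' '0' "100110" rfl,
      mismatchSum6 word c0 c1 c2 c3 c4 c5 t h '1' '0' '1' '0' '0' '1' "101001" rfl,
      mismatchSum6 word c0 c1 c2 c3 c4 c5 t h '1' '1' '0' '1' '0' '1' "110101" rfl,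
      mismatchSum6 word c0 c1 c2 c3 c4 c5 t h '1' '1' '1' '0' '1' '0' "111010" rfl]
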